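-- pv_equiv track=rewrite | github.com/kr4g/Klotho | klotho/thetos/composition/compositional.py | _partition_non_rest_segments
-- ===== SOURCE A (Python) =====
-- def _partition_non_rest_segments(leaves, rest_set):
--     segments = []
--     current = []
--     for leaf in leaves:
--         if leaf in rest_set:
--             if len(current) >= 2:
--                 segments.append(tuple(current))
--             current = []
--         else:
--             current.append(leaf)
--     if len(current) >= 2:
--         segments.append(tuple(current))
--     return segments
-- ===== SOURCE B (Python) =====
-- def _partition_non_rest_segments(leaves, rest_set):
--     boundaries = [i for i, leaf in enumerate(leaves) if leaf in rest_set]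
--     boundaries.append(len(leaves))
--     segments = []
--     prev = 0
--     for b in boundaries:
--         if b - prev >= 2:
--             segments.append(tuple(leaves[prev:b]))
--         prev = b + 1
--     return segments
-- ===== Notes on version B (the rewrite author's own statement) =====
-- stated objective: alternative
-- what changed: Replaces A's single pass with a running 'current' accumulator and duplicated post-loop flush by a two-phase boundary formulation: first collect the indices of rest leaves, then slice the input between consecutive boundaries and keep slices of length >= 2.
import Mathlib
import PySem

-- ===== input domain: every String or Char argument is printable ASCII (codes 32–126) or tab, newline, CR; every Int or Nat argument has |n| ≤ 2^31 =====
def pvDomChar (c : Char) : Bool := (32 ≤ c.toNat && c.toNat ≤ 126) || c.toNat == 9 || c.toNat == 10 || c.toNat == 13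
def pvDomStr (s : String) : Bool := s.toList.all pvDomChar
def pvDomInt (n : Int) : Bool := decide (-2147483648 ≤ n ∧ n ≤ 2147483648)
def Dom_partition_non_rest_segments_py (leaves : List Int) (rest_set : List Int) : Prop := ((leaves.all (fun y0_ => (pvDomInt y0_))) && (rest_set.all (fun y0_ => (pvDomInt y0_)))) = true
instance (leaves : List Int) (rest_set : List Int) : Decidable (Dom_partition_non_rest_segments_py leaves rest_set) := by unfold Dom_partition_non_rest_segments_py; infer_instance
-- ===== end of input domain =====

-- B replaces A's running `current` accumulator with a two-phase boundary pass:
-- collect the indices of rest leaves, then slice the input between consecutive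
-- boundaries and keep slices of length ≥ 2 (objective: alternative decomposition).

-- ===== PORT A =====
-- the for-loop of A over (segments, current)
def pvALoop (rest_set : List Int) : List Int → List (List Int) → List Int → List (List Int)
  | [], segments, current =>
      if 2 ≤ current.length then segments ++ [current] else segments
  | leaf :: ls, segments, current =>
      if leaf ∈ rest_set then
        pvALoop rest_set ls (if 2 ≤ current.length then segments ++ [current] else segments) []
      else
        pvALoop rest_set ls segments (current ++ [leaf])

def partition_non_rest_segments_py (leaves : List Int) (rest_set : List Int) : List (List Int) :=
  pvALoop rest_set leaves [] []

-- ===== PORT B =====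
-- the for-loop of B over (prev, segments), driven by the boundary list
def pvBLoop (leaves : List Int) : List Int → Int → List (List Int) → List (List Int)
  | [], _, segments => segments
  | b :: bs, prev, segments =>
      pvBLoop leaves bs (b + 1)
        (if 2 ≤ b - prev then segments ++ [PySem.List.slice leaves (some prev) (some b)] else segments)

def partition_non_rest_segments_py_alt (leaves : List Int) (rest_set : List Int) : List (List Int) :=
  let boundaries :=
    ((PySem.List.enumerate leaves).filterMap
      (fun p => if p.2 ∈ rest_set then some p.1 else none)) ++ [(leaves.length : Int)]
  pvBLoop leaves boundaries 0 []

-- ===== PRECONDITION & SPEC =====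
def Spec_partition_non_rest_segments_py (leaves : List Int) (rest_set : List Int) (out : List (List Int)) : Prop := out = partition_non_rest_segments_py_alt leaves rest_set
instance (leaves : List Int) (rest_set : List Int) (out : List (List Int)) : Decidable (Spec_partition_non_rest_segments_py leaves rest_set out) := by unfold Spec_partition_non_rest_segments_py; infer_instance

-- ===== CLAIM (what is proved, stated in full; the proofs are below) =====
def Claim_equal_partition_non_rest_segments_py : Prop := ∀ (leaves : List Int) (rest_set : List Int), Dom_partition_non_rest_segments_py leaves rest_set → Spec_partition_non_rest_segments_py leaves rest_set (partition_non_rest_segments_py leaves rest_set)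

-- ===== LEMMAS AND PROOFS =====

-- the residual of A's loop: what it appends beyond the segments already accumulated
def pvF (rest_set : List Int) : List Int → List Int → List (List Int)
  | [], c => if 2 ≤ c.length then [c] else []
  | x :: t, c =>
      if x ∈ rest_set then (if 2 ≤ c.length then [c] else []) ++ pvF rest_set t []
      else pvF rest_set t (c ++ [x])

theorem pvALoop_eq_pvF (rest_set : List Int) :
    ∀ (ls : List Int) (segs : List (List Int)) (c : List Int),
      pvALoop rest_set ls segs c = segs ++ pvF rest_set ls c := by
  intro ls
  induction ls with
  | nil => intro segs c; simp only [pvALoop, pvF]; split_ifs <;> simp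
  | cons x t ih =>
      intro segs c
      by_cases hx : x ∈ rest_set
      · simp only [pvALoop, pvF, hx, if_true, ih]
        split_ifs <;> simp [List.append_assoc]
      · simp [pvALoop, pvF, hx, ih]

-- recursive form of B's boundary comprehension
def pvBnd (rest_set : List Int) : Int → List Int → List Int
  | _, [] => []
  | i, x :: t => if x ∈ rest_set then i :: pvBnd rest_set (i + 1) t else pvBnd rest_set (i + 1) t

theorem pvBnd_eq (rest_set : List Int) :
    ∀ (ls : List Int) (s : Int),
      (PySem.List.enumerate ls s).filterMap
        (fun p => if p.2 ∈ rest_set then some p.1 else none) = pvBnd rest_set s ls := by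
  intro ls
  induction ls with
  | nil => intro s; simp [PySem.List.enumerate_nil, pvBnd]
  | cons x t ih =>
      intro s
      by_cases hx : x ∈ rest_set <;>
        simp [PySem.List.enumerate_cons, pvBnd, hx, ih]

theorem pvBLoop_main (rest_set : List Int) :
    ∀ (tail full c : List Int) (prev : Nat) (segs : List (List Int)),
      full.drop prev = c ++ tail →
      prev + c.length + tail.length = full.length →
      pvBLoop full (pvBnd rest_set ((prev : Int) + (c.length : Int)) tail ++ [(full.length : Int)])
          (prev : Int) segs
        = segs ++ pvF rest_set tail c := by
  intro tail
  induction tail with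
  | nil =>
      intro full c prev segs hdrop hlen
      simp only [pvBnd, List.nil_append, pvBLoop, pvF]
      have hl : full.length = prev + c.length := by simpa using hlen.symm
      have hslice : PySem.List.slice full (some (prev : Int)) (some (full.length : Int)) = c := by
        rw [hl]
        have := PySem.List.slice_natCast (xs := full) (a := prev) (b := prev + c.length)
        rw [this, hdrop]
        simp
      split_ifs with h1 h2 h2
      · rw [hslice]
      · exfalso; apply h2; omega
      · exfalso; apply h1; rw [hl]; push_cast; omega
      · simp
  | cons x t ih =>
      intro full c prev segs hdrop hlen
      by_cases hx : x ∈ rest_set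
      · simp only [pvBnd, hx, if_true, List.cons_append, pvBLoop, pvF]
        have hslice : PySem.List.slice full (some (prev : Int)) (some ((prev : Int) + (c.length : Int))) = c := by
          have := PySem.List.slice_natCast (xs := full) (a := prev) (b := prev + c.length)
          push_cast at this ⊢
          rw [this, hdrop]
          simp
        have hdrop' : full.drop (prev + c.length + 1) = [] ++ t := by
          have : full.drop (prev + c.length + 1) = (full.drop prev).drop (c.length + 1) := by
            rw [List.drop_drop]; ring_nf
          rw [this, hdrop]
          simp [List.drop_append]
        have hlen' : (prev + c.length + 1) + List.length ([] : List Int) + t.length = full.length := by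
          simp at hlen ⊢; omega
        have hIH := ih full [] (prev + c.length + 1) (if 2 ≤ (c.length : Int) then segs ++ [c] else segs) hdrop' hlen'
        simp only [List.length_nil, Nat.cast_zero, add_zero] at hIH
        push_cast at hIH
        have hb : (prev : Int) + (c.length : Int) - (prev : Int) = (c.length : Int) := by ring
        rw [hb, hslice]
        rw [hIH]
        split_ifs with h1 h2 h2
        · simp
        · exfalso; apply h2; exact_mod_cast h1
        · exfalso; apply h1; exact_mod_cast h2
        · simp
      · simp only [pvBnd, hx, if_false, pvF]
        have hdrop' : full.drop prev = (c ++ [x]) ++ t := by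
          rw [hdrop]; simp
        have hlen' : prev + (c ++ [x]).length + t.length = full.length := by
          simp at hlen ⊢; omega
        have hIH := ih full (c ++ [x]) prev segs hdrop' hlen'
        simp only [List.length_append, List.length_cons, List.length_nil] at hIH
        push_cast at hIH
        have harg : (prev : Int) + ((c.length : Int) + 1) = (prev : Int) + (c.length : Int) + 1 := by ring
        rw [harg] at hIH
        exact hIH

-- ===== VERDICT (by name: the statement is the Claim_ definition above) =====
theorem partition_non_rest_segments_py_spec : Claim_equal_partition_non_rest_segments_py := by
  intro leaves rest_set _
  unfold Spec_partition_non_rest_segments_py partition_non_rest_segments_py partition_non_rest_segments_py_alt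
  rw [pvALoop_eq_pvF]
  rw [pvBnd_eq]
  have := pvBLoop_main rest_set leaves leaves [] 0 [] (by simp) (by simp)
  simpa using this.symm
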